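-- pv_equiv track=rewrite | github.com/haus20xx/jira2gh | jira_pr_workflow.py | prioritize_items_by_branch
-- ===== SOURCE A (Python) =====
-- def prioritize_items_by_branch(items, current_branch):
--     """Reorder items to prioritize those matching the current branch."""
--     if not current_branch or not items:
--         return items
--
--     matching_items = []
--     other_items = []
--
--     for item in items:
--         jira_key = item.get("key", "")
--         # Check if the Jira key appears in the branch name (case insensitive)
--         if jira_key.lower() in current_branch.lower():
--             matching_items.append(item)
--         else:
--             other_items.append(item)
--
--     # Return matching items first, then others
--     return matching_items + other_items
-- ===== SOURCE B (Python) =====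
-- def prioritize_items_by_branch(items, current_branch):
--     """Reorder items to prioritize those matching the current branch."""
--     if not current_branch or not items:
--         return items
--     branch_lower = current_branch.lower()
--     # Stable sort: matching items (key 0) keep their order and come first.
--     return sorted(items, key=lambda item: 0 if item.get("key", "").lower() in branch_lower else 1)
-- ===== Notes on version B (the rewrite author's own statement) =====
-- stated objective: idiomatic
-- what changed: The manual two-list partition loop is replaced by a single stable sort on a 0/1 key (matching items sort first, stability preserves intra-group order); the falsy-input guard is kept.
import Mathlib
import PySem

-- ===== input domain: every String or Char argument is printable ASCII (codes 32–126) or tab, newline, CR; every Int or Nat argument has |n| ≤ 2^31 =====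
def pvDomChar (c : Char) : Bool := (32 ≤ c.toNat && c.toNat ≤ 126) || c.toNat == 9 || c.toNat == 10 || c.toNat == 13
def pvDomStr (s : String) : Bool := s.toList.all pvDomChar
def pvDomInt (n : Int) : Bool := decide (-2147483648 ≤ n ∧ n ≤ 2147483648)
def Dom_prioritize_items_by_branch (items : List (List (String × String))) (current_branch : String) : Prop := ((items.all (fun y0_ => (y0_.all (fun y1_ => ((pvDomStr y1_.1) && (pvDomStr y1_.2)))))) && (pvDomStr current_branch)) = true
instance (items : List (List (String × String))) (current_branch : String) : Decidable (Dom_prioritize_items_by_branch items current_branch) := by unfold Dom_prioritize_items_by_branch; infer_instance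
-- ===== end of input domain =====

-- B replaces A's manual two-list partition loop by one stable sort on a 0/1 key (idiomatic, same values).

-- ===== PORT A =====
-- literal transliteration: guard, then a left-to-right loop appending each item to one of two lists
def prioritize_items_by_branch (items : List (List (String × String))) (current_branch : String) : List (List (String × String)) :=
  if current_branch = "" ∨ items = [] then items
  else
    let pair := items.foldl
      (fun (acc : List (List (String × String)) × List (List (String × String))) item =>
        let jira_key := PySem.Dict.getD ⟨item⟩ "key" ""
        if PySem.Str.isIn (PySem.Str.lower jira_key) (PySem.Str.lower current_branch) then
          (acc.1 ++ [item], acc.2)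
        else
          (acc.1, acc.2 ++ [item]))
      ([], [])
    pair.1 ++ pair.2

-- ===== PORT B =====
-- sort key: 0 if the item's jira key occurs in the branch name (case-insensitive), else 1
def pvSortKey (current_branch : String) (item : List (String × String)) : Int :=
  if PySem.Str.isIn (PySem.Str.lower (PySem.Dict.getD ⟨item⟩ "key" "")) (PySem.Str.lower current_branch) then 0 else 1

def prioritize_items_by_branch_alt (items : List (List (String × String))) (current_branch : String) : List (List (String × String)) :=
  if current_branch = "" ∨ items = [] then items
  else PySem.List.sorted items (pvSortKey current_branch) false

-- ===== PRECONDITION & SPEC =====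
def Spec_prioritize_items_by_branch (items : List (List (String × String))) (current_branch : String) (out : List (List (String × String))) : Prop := out = prioritize_items_by_branch_alt items current_branch
instance (items : List (List (String × String))) (current_branch : String) (out : List (List (String × String))) : Decidable (Spec_prioritize_items_by_branch items current_branch out) := by unfold Spec_prioritize_items_by_branch; infer_instance

-- ===== CLAIM (what is proved, stated in full; the proofs are below) =====
def Claim_equal_prioritize_items_by_branch : Prop := ∀ (items : List (List (String × String))) (current_branch : String), Dom_prioritize_items_by_branch items current_branch → Spec_prioritize_items_by_branch items current_branch (prioritize_items_by_branch items current_branch)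

-- ===== LEMMAS AND PROOFS =====

-- the matching predicate both programs test
def pvMatches (current_branch : String) (item : List (String × String)) : Bool :=
  PySem.Str.isIn (PySem.Str.lower (PySem.Dict.getD ⟨item⟩ "key" "")) (PySem.Str.lower current_branch)

theorem pvSortKey_eq (cb : String) (x : List (String × String)) :
    pvSortKey cb x = if pvMatches cb x then 0 else 1 := rfl

-- stable insertion of x into A ++ B when x goes strictly before everything in B and nothing in A
theorem insertBy_middle {α : Type} (before : α → α → Bool) (x : α) (A B : List α)
    (hA : ∀ y ∈ A, before x y = false) (hB : ∀ y ∈ B, before x y = true) :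
    PySem.List.insertBy before x (A ++ B) = A ++ x :: B := by
  induction A with
  | nil =>
    cases B with
    | nil => rfl
    | cons y ys => simp [PySem.List.insertBy, hB y (by simp)]
  | cons a A ih =>
    simp only [List.cons_append, PySem.List.insertBy, hA a (by simp)]
    simp only [ih (fun y hy => hA y (List.mem_cons_of_mem a hy))]
    simp

-- the insertion-sort fold with a 0/1 key keeps a partitioned accumulator partitioned
theorem foldl_insertBy_partition (cb : String) (xs : List (List (String × String))) :
    ∀ (M O : List (List (String × String))),
      (∀ y ∈ M, pvMatches cb y = true) → (∀ y ∈ O, pvMatches cb y = false) →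
      xs.foldl (fun acc x => PySem.List.insertBy (fun a b => decide (pvSortKey cb a < pvSortKey cb b)) x acc) (M ++ O)
        = (M ++ xs.filter (pvMatches cb)) ++ (O ++ xs.filter (fun x => !pvMatches cb x)) := by
  induction xs with
  | nil => intro M O _ _; simp
  | cons x xs ih =>
    intro M O hM hO
    by_cases hx : pvMatches cb x = true
    · have hins : PySem.List.insertBy (fun a b => decide (pvSortKey cb a < pvSortKey cb b)) x (M ++ O) = M ++ x :: O := by
        apply insertBy_middle
        · intro y hy; simp [pvSortKey_eq, hx, hM y hy]
        · intro y hy; simp [pvSortKey_eq, hx, hO y hy]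
      have : M ++ x :: O = (M ++ [x]) ++ O := by simp
      simp only [List.foldl_cons, hins, this]
      rw [ih (M ++ [x]) O (by
        intro y hy
        rcases List.mem_append.mp hy with h | h
        · exact hM y h
        · rw [List.mem_singleton.mp h]; exact hx) hO]
      simp [hx]
    · have hx' : pvMatches cb x = false := by simpa using hx
      have hins : PySem.List.insertBy (fun a b => decide (pvSortKey cb a < pvSortKey cb b)) x (M ++ O) = (M ++ O) ++ [x] := by
        apply PySem.List.insertBy_of_forall_not_before
        intro y hy
        by_cases h : pvMatches cb y = true <;> simp [pvSortKey_eq, hx', h]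
      have : (M ++ O) ++ [x] = M ++ (O ++ [x]) := by simp
      simp only [List.foldl_cons, hins, this]
      rw [ih M (O ++ [x]) hM (by
        intro y hy
        rcases List.mem_append.mp hy with h | h
        · exact hO y h
        · rw [List.mem_singleton.mp h]; exact hx')]
      simp [hx']

-- B's sort is filter-matching ++ filter-non-matching
theorem sorted_eq_partition (cb : String) (xs : List (List (String × String))) :
    PySem.List.sorted xs (pvSortKey cb) false
      = xs.filter (pvMatches cb) ++ xs.filter (fun x => !pvMatches cb x) := by
  rw [PySem.List.sorted_eq_foldl_insertBy]
  have := foldl_insertBy_partition cb xs [] [] (by simp) (by simp)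
  simpa using this

-- A's loop computes the two filters
theorem foldl_pair_partition (cb : String) (xs : List (List (String × String))) :
    ∀ (m o : List (List (String × String))),
      xs.foldl
        (fun (acc : List (List (String × String)) × List (List (String × String))) item =>
          let jira_key := PySem.Dict.getD ⟨item⟩ "key" ""
          if PySem.Str.isIn (PySem.Str.lower jira_key) (PySem.Str.lower cb) then
            (acc.1 ++ [item], acc.2)
          else
            (acc.1, acc.2 ++ [item])) (m, o)
        = (m ++ xs.filter (pvMatches cb), o ++ xs.filter (fun x => !pvMatches cb x)) := by
  induction xs with
  | nil => intro m o; simp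
  | cons x xs ih =>
    intro m o
    by_cases hx : pvMatches cb x = true
    · have hx2 : PySem.Str.isIn (PySem.Str.lower (PySem.Dict.getD ⟨x⟩ "key" "")) (PySem.Str.lower cb) = true := hx
      simp only [List.foldl_cons, hx2, if_true]
      rw [ih]
      simp [hx]
    · have hx' : pvMatches cb x = false := by simpa using hx
      have hx2 : PySem.Str.isIn (PySem.Str.lower (PySem.Dict.getD ⟨x⟩ "key" "")) (PySem.Str.lower cb) = false := hx'
      simp only [List.foldl_cons, hx2]
      rw [ih]
      simp [hx']

-- ===== VERDICT (by name: the statement is the Claim_ definition above) =====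
theorem prioritize_items_by_branch_spec : Claim_equal_prioritize_items_by_branch := by
  intro items cb _
  unfold Spec_prioritize_items_by_branch prioritize_items_by_branch prioritize_items_by_branch_alt
  by_cases hg : cb = "" ∨ items = []
  · simp [hg]
  · simp only [hg, if_false]
    rw [sorted_eq_partition]
    have h := foldl_pair_partition cb items [] []
    simp only [List.nil_append] at h
    simp only [h]
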